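-- pv_equiv track=rewrite | github.com/civodlu/trw | src/trw/train/callback_export_classification_by_epoch.py | sort_split_data
-- ===== SOURCE A (Python) =====
-- import collections
--
-- def sort_split_data(errors_by_sample, worst_k_samples):
--     """
--     Helper function to sort the samples
--
--     Args:
--         errors_by_sample: the data
--         worst_k_samples: the number of samples to select or `None`
--
--     Returns:
--         sorted data
--     """
--     nb_errors = collections.defaultdict(lambda: 0)
--     for uid, classification_by_epoch in errors_by_sample.items():
--         for classification_correct, epoch in classification_by_epoch:
--             if not classification_correct:
--                 nb_errors[uid] += 1
--
--     sorted_uid_nb = sorted(list(nb_errors.items()), key=lambda values: values[1], reverse=True)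
--     nb_samples = len(nb_errors)
--     if worst_k_samples is not None:
--         nb_samples = min(worst_k_samples, nb_samples)
--
--     sorted_errors_by_sample = []
--     for i in range(nb_samples):
--         uid, nb_e = sorted_uid_nb[i]
--         sorted_errors_by_sample.append((uid, errors_by_sample[uid]))
--
--     return sorted_errors_by_sample
-- ===== SOURCE B (Python) =====
-- def sort_split_data(errors_by_sample, worst_k_samples):
--     """
--     Pigeonhole by error count instead of a comparison sort: one pass collects
--     (uid, nb_errors) with the running maximum count, then counts are walked
--     from the largest down, keeping insertion order inside each count.
--     """
--     nb_errors = []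
--     max_errors = 0
--     for uid, classification_by_epoch in errors_by_sample.items():
--         n = sum(1 for classification_correct, _ in classification_by_epoch
--                 if not classification_correct)
--         if n > 0:
--             nb_errors.append((uid, n))
--             max_errors = max(max_errors, n)
--
--     order = []
--     for c in range(max_errors, 0, -1):
--         for item in nb_errors:
--             if item[1] == c:
--                 order.append(item)
--
--     k = len(order) if worst_k_samples is None else min(worst_k_samples, len(order))
--     return [(uid, errors_by_sample[uid]) for uid, _ in order[:max(0, k)]]
-- ===== Notes on version B (the rewrite author's own statement) =====
-- stated objective: alternative
-- what changed: Replaces defaultdict counting plus sorted(..., reverse=True) with a single list pass collecting (uid, count) and the maximum count, then a pigeonhole walk of counts from the maximum down to 1 (stable within a count), and a slice instead of an indexed range loop.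
import Mathlib
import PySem

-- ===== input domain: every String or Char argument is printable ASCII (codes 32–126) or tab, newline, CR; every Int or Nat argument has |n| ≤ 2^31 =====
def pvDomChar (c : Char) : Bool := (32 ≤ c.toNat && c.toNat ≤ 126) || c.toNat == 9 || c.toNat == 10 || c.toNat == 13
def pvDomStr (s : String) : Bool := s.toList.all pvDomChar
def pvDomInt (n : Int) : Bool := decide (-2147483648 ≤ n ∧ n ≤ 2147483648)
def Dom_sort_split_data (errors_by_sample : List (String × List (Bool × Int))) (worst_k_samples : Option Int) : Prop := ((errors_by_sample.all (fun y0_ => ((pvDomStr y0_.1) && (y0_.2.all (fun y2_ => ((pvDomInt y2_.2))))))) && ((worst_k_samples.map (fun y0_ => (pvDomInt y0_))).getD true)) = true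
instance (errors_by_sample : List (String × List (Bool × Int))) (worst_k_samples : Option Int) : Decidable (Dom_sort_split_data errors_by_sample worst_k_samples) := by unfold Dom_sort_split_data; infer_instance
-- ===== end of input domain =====

-- B replaces A's comparison sort by a pigeonhole walk over error counts (same return value; objective: alternative).

-- ===== PORT A =====
def sort_split_data (errors_by_sample : List (String × List (Bool × Int))) (worst_k_samples : Option Int) : List (String × (List (Bool × Int))) :=
  let nb_errors : PySem.Dict String Int :=
    errors_by_sample.foldl
      (fun d p => p.2.foldl (fun d ce => if !ce.1 then d.modify p.1 0 (· + 1) else d) d)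
      PySem.Dict.empty
  let sorted_uid_nb := PySem.List.sorted nb_errors.items (fun values => values.2) true
  let nb_samples : Int :=
    match worst_k_samples with
    | none => (nb_errors.size : Int)
    | some k => min k (nb_errors.size : Int)
  (PySem.List.pyRange 0 nb_samples).foldl
    (fun acc i =>
      -- sorted_uid_nb[i]: i is always in range (nb_samples ≤ length), so pyGetD's default is never used
      let uid := (PySem.List.pyGetD sorted_uid_nb i ("", 0)).1
      -- errors_by_sample[uid]: the key is always present
      acc ++ [(uid, (PySem.Dict.mk errors_by_sample).getD uid [])])
    []

-- ===== PORT B =====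
def sort_split_data_alt (errors_by_sample : List (String × List (Bool × Int))) (worst_k_samples : Option Int) : List (String × (List (Bool × Int))) :=
  let acc :=
    errors_by_sample.foldl
      (fun acc p =>
        let n : Int := ((p.2.filter (fun ce => !ce.1)).map (fun _ => (1 : Int))).sum
        if 0 < n then (acc.1 ++ [(p.1, n)], max acc.2 n) else acc)
      (([] : List (String × Int)), (0 : Int))
  let nb_errors := acc.1
  let max_errors := acc.2
  let order :=
    (PySem.List.pyRange max_errors 0 (-1)).foldl
      (fun acc c => nb_errors.foldl (fun acc item => if item.2 == c then acc ++ [item] else acc) acc)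
      []
  let k : Int :=
    match worst_k_samples with
    | none => (order.length : Int)
    | some w => min w (order.length : Int)
  (PySem.List.slice order none (some (max 0 k))).map
    -- errors_by_sample[uid]: the key is always present
    (fun item => (item.1, (PySem.Dict.mk errors_by_sample).getD item.1 []))

-- ===== PRECONDITION & SPEC =====
-- Pre_ excludes association lists with duplicate uids: they do not represent a Python dict
-- (a dict literal collapses duplicate keys), so A's merged counts there are accidental.
def Pre_sort_split_data (errors_by_sample : List (String × List (Bool × Int))) (worst_k_samples : Option Int) : Prop :=
  (errors_by_sample.map Prod.fst).Nodup
instance (errors_by_sample : List (String × List (Bool × Int))) (worst_k_samples : Option Int) : Decidable (Pre_sort_split_data errors_by_sample worst_k_samples) := by unfold Pre_sort_split_data; infer_instance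
def pvWitness_sort_split_data : (List (String × List (Bool × Int))) × Option Int :=
  ([("a", [(false, 0), (true, 1)]), ("b", [(false, 2)])], some 1)
def Spec_sort_split_data (errors_by_sample : List (String × List (Bool × Int))) (worst_k_samples : Option Int) (out : List (String × (List (Bool × Int)))) : Prop := out = sort_split_data_alt errors_by_sample worst_k_samples
instance (errors_by_sample : List (String × List (Bool × Int))) (worst_k_samples : Option Int) (out : List (String × (List (Bool × Int)))) : Decidable (Spec_sort_split_data errors_by_sample worst_k_samples out) := by unfold Spec_sort_split_data; infer_instance

-- ===== CLAIM (what is proved, stated in full; the proofs are below) =====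
def Claim_equal_sort_split_data : Prop := ∀ (errors_by_sample : List (String × List (Bool × Int))) (worst_k_samples : Option Int), Dom_sort_split_data errors_by_sample worst_k_samples → Pre_sort_split_data errors_by_sample worst_k_samples → Spec_sort_split_data errors_by_sample worst_k_samples (sort_split_data errors_by_sample worst_k_samples)

-- ===== LEMMAS AND PROOFS =====

-- the error count of one sample, as both programs compute it
def pvCnt (p : String × List (Bool × Int)) : Int := ((p.2.filter (fun ce => !ce.1)).length : Int)

-- the (uid, count) list both programs effectively build (uids with ≥ 1 error, input order)
def pvNb (e : List (String × List (Bool × Int))) : List (String × Int) :=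
  (e.filter (fun p => decide (0 < pvCnt p))).map (fun p => (p.1, pvCnt p))

-- the descending count list [m, m-1, …, 1]
def pvDesc : Nat → List Int
  | 0 => []
  | n + 1 => ((n + 1 : Nat) : Int) :: pvDesc n

def pvBuckets (m : Nat) (nb : List (String × Int)) : List (String × Int) :=
  (pvDesc m).flatMap (fun c => nb.filter (fun q => q.2 == c))

-- the maximum error count B's first loop maintains
def pvMax (e : List (String × List (Bool × Int))) : Int :=
  (e.filter (fun p => decide (0 < pvCnt p))).foldl (fun m p => max m (pvCnt p)) 0

lemma pvInner (uid : String) (lst : List (Bool × Int)) (d : PySem.Dict String Int) :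
    lst.foldl (fun d ce => if !ce.1 then d.modify uid 0 (· + 1) else d) d
    = if (lst.filter (fun ce => !ce.1)).length = 0 then d
      else d.insert uid (d.getD uid 0 + ((lst.filter (fun ce => !ce.1)).length : Int)) := by
  induction lst generalizing d with
  | nil => simp
  | cons ce rest ih =>
    rw [List.foldl_cons]
    by_cases h : ce.1
    · rw [if_neg (by simp [h]), ih, List.filter_cons_of_neg (by simp [h])]
    · rw [if_pos (by simp [h]), ih, List.filter_cons_of_pos (by simp [h])]
      simp only [List.length_cons, PySem.Dict.modify]
      by_cases h0 : (List.filter (fun ce => !ce.1) rest).length = 0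
      · simp [h0]
      · rw [if_neg h0, if_neg (by omega)]
        rw [PySem.Dict.insert_insert_self, PySem.Dict.getD_insert_self]
        congr 1
        push_cast
        ring

lemma pvItemsA : ∀ (e : List (String × List (Bool × Int))) (d : PySem.Dict String Int),
    (∀ p ∈ e, d.contains p.1 = false) → (e.map Prod.fst).Nodup →
    (e.foldl (fun d p => p.2.foldl (fun d ce => if !ce.1 then d.modify p.1 0 (· + 1) else d) d) d).items
    = d.items ++ pvNb e := by
  intro e
  induction e with
  | nil => intro d _ _; simp [pvNb]
  | cons p rest ih =>
    intro d hfresh hnd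
    rw [List.foldl_cons, pvInner]
    by_cases h0 : (List.filter (fun ce => !ce.1) p.2).length = 0
    · rw [if_pos h0, ih d (fun q hq => hfresh q (by simp [hq])) (by simpa using hnd.of_cons)]
      have hnp : ¬ (0 < pvCnt p) := by simp only [pvCnt]; omega
      simp only [pvNb, List.filter_cons]
      rw [if_neg (by simpa using hnp)]
    · rw [if_neg h0]
      have hc : d.contains p.1 = false := hfresh p (by simp)
      rw [PySem.Dict.getD_of_not_contains d 0 hc]
      have hfresh' : ∀ q ∈ rest, (d.insert p.1 (0 + ((List.filter (fun ce => !ce.1) p.2).length : Int))).contains q.1 = false := by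
        intro q hq
        rw [PySem.Dict.contains_insert]
        have h1 : q.1 ≠ p.1 := by
          simp only [List.map_cons, List.nodup_cons] at hnd
          intro heq
          exact hnd.1 (heq ▸ (List.mem_map_of_mem hq))
        simp [h1, hfresh q (by simp [hq])]
      rw [ih _ hfresh' (by simpa using hnd.of_cons)]
      rw [PySem.Dict.items_insert_of_not_contains d _ hc]
      have hp : (0 < pvCnt p) := by simp only [pvCnt]; omega
      simp only [pvNb, List.filter_cons]
      rw [if_pos (by simpa using hp)]
      simp [pvCnt]

lemma pvInsertBy_pass {α : Type} (before : α → α → Bool) (q : α) :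
    ∀ (P S : List α), (∀ y ∈ P, before q y = false) →
    PySem.List.insertBy before q (P ++ S) = P ++ PySem.List.insertBy before q S := by
  intro P
  induction P with
  | nil => intro S h; simp
  | cons y P ih =>
    intro S h
    have hy : before q y = false := h y (by simp)
    simp only [List.cons_append, PySem.List.insertBy, hy]
    simp [ih S (fun z hz => h z (by simp [hz]))]

lemma pvInsertBy_head {α : Type} (before : α → α → Bool) (q : α) (S : List α)
    (h : ∀ y ∈ S, before q y = true) : PySem.List.insertBy before q S = q :: S := by
  cases S with
  | nil => rfl
  | cons y t => simp [PySem.List.insertBy, h y (by simp)]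

lemma pvDesc_le : ∀ (n : Nat), ∀ c ∈ pvDesc n, 1 ≤ c ∧ c ≤ (n : Int) := by
  intro n
  induction n with
  | zero => simp [pvDesc]
  | succ k ih =>
    intro c hc
    rcases List.mem_cons.mp hc with rfl | hc
    · constructor <;> omega
    · have := ih c hc; omega

lemma pvDesc_split : ∀ (m v : Nat), v ≤ m →
    ∃ F, pvDesc m = F ++ pvDesc v ∧ ∀ c ∈ F, (v : Int) < c := by
  intro m
  induction m with
  | zero => intro v hv; exact ⟨[], by simp [Nat.le_zero.mp hv], by simp⟩
  | succ n ih =>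
    intro v hv
    by_cases h : v = n + 1
    · exact ⟨[], by simp [h], by simp⟩
    · obtain ⟨F, hF, hlt⟩ := ih v (by omega)
      refine ⟨((n + 1 : Nat) : Int) :: F, by simp [pvDesc, hF], ?_⟩
      intro c hc
      rcases List.mem_cons.mp hc with rfl | hc
      · omega
      · exact hlt c hc

lemma pvBucket (m : Nat) : ∀ (nb : List (String × Int)),
    (∀ q ∈ nb, 0 < q.2 ∧ q.2 ≤ (m : Int)) →
    PySem.List.sorted nb (fun v => v.2) true = pvBuckets m nb := by
  intro nb
  induction nb using List.reverseRecOn with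
  | nil => intro _; simp [pvBuckets, PySem.List.sorted]
  | append_singleton nb q ih =>
    intro hb
    have hq := hb q (by simp)
    rw [PySem.List.sorted_rev_eq_foldl_insertBy, List.foldl_append, List.foldl_cons, List.foldl_nil,
        ← PySem.List.sorted_rev_eq_foldl_insertBy,
        ih (fun r hr => hb r (by simp [hr]))]
    -- split the descending count list at v := q.2
    set v : Nat := q.2.toNat with hvdef
    have hvcast : (v : Int) = q.2 := by omega
    obtain ⟨F, hF, hFgt⟩ := pvDesc_split m v (by omega)
    have hvpos : ∃ w, v = w + 1 := ⟨v - 1, by omega⟩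
    obtain ⟨w, hw⟩ := hvpos
    have hdv : pvDesc v = (v : Int) :: pvDesc w := by rw [hw]; simp [pvDesc]
    -- left part passed over, tail inserted before
    have hsplit : pvBuckets m nb
        = (F.flatMap (fun c => nb.filter (fun r => r.2 == c)) ++ nb.filter (fun r => r.2 == (v : Int)))
          ++ (pvDesc w).flatMap (fun c => nb.filter (fun r => r.2 == c)) := by
      rw [pvBuckets, hF, hdv, List.flatMap_append, List.flatMap_cons]
      simp [List.append_assoc]
    rw [hsplit]
    rw [pvInsertBy_pass _ q _ _ ?hpass, pvInsertBy_head _ q _ ?hhead]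
    case hpass =>
      intro y hy
      rcases List.mem_append.mp hy with hy | hy
      · obtain ⟨c, hc, hyc⟩ := List.mem_flatMap.mp hy
        have := (List.mem_filter.mp hyc).2
        have hyc2 : y.2 = c := by simpa using this
        have := hFgt c hc
        simp only [decide_eq_false_iff_not, not_lt]
        omega
      · have := (List.mem_filter.mp hy).2
        have hyc2 : y.2 = (v : Int) := by simpa using this
        simp only [decide_eq_false_iff_not, not_lt]
        omega
    case hhead =>
      intro y hy
      obtain ⟨c, hc, hyc⟩ := List.mem_flatMap.mp hy
      have hcle := pvDesc_le w c hc
      have := (List.mem_filter.mp hyc).2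
      have hyc2 : y.2 = c := by simpa using this
      simp only [decide_eq_true_eq]
      omega
    -- now identify with pvBuckets m (nb ++ [q])
    rw [pvBuckets, hF, hdv, List.flatMap_append, List.flatMap_cons]
    have hfq : ∀ c : Int, c ≠ q.2 → (nb ++ [q]).filter (fun r => r.2 == c) = nb.filter (fun r => r.2 == c) := by
      intro c hcne
      rw [List.filter_append]
      simp [Ne.symm hcne]
    have hFpart : F.flatMap (fun c => (nb ++ [q]).filter (fun r => r.2 == c))
        = F.flatMap (fun c => nb.filter (fun r => r.2 == c)) := by
      apply List.flatMap_congr  -- name?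
      intro c hc
      exact hfq c (by have := hFgt c hc; omega)
    rw [hFpart]
    have hVpart : (nb ++ [q]).filter (fun r => r.2 == (v : Int)) = nb.filter (fun r => r.2 == (v : Int)) ++ [q] := by
      rw [List.filter_append]
      simp [hvcast]
    have hWpart : (pvDesc w).flatMap (fun c => (nb ++ [q]).filter (fun r => r.2 == c))
        = (pvDesc w).flatMap (fun c => nb.filter (fun r => r.2 == c)) := by
      apply List.flatMap_congr
      intro c hc
      have := pvDesc_le w c hc
      exact hfq c (by omega)
    rw [hVpart, hWpart]
    simp [List.append_assoc]

lemma pvRangeDesc : ∀ (m : Nat), PySem.List.pyRange (m : Int) 0 (-1) = pvDesc m := by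
  have key : ∀ m : Nat, (List.range m).map (fun k => ((m : Int) - (k : Nat))) = pvDesc m := by
    intro m
    induction m with
    | zero => simp [pvDesc]
    | succ n ihn =>
      rw [List.range_succ_eq_map, List.map_cons, List.map_map]
      simp only [pvDesc]
      refine List.cons_eq_cons.mpr ⟨by norm_num, ?_⟩
      rw [← ihn]
      apply List.map_congr_left
      intro k _
      simp only [Function.comp_apply]
      push_cast
      ring
  intro m
  rw [PySem.List.pyRange]
  simp only [if_neg (by norm_num : ¬ (-1 : Int) = 0)]
  norm_num
  by_cases hm : 0 < m
  · rw [if_pos (by exact_mod_cast hm)]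
    rw [← key m]
    apply List.map_congr_left
    intro k _
    ring
  · have : m = 0 := by omega
    subst this
    simp [pvDesc]

lemma pvTake {α β : Type} (g : α → β) (dflt : α) : ∀ (xs : List α) (t : Nat), t ≤ xs.length →
    (List.range t).map (fun (k : Nat) => g (PySem.List.pyGetD xs (k : Int) dflt)) = (xs.take t).map g := by
  intro xs t ht
  apply List.ext_getElem
  · simp [min_eq_left ht]
  · intro i h1 h2
    simp only [List.getElem_map, List.getElem_range, List.getElem_take]
    rw [PySem.List.pyGetD_natCast]
    congr 1
    rw [List.getD_eq_getElem]

-- B's first loop computes (pvNb e, pvMax e)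
lemma pvBfold (e : List (String × List (Bool × Int))) :
    e.foldl
      (fun acc p =>
        let n : Int := ((p.2.filter (fun ce => !ce.1)).map (fun _ => (1 : Int))).sum
        if 0 < n then (acc.1 ++ [(p.1, n)], max acc.2 n) else acc)
      (([] : List (String × Int)), (0 : Int)) = (pvNb e, pvMax e) := by
  rw [PySem.List.foldl_congr_mem _ _
      (fun acc p => (if 0 < pvCnt p then acc.1 ++ [(p.1, pvCnt p)] else acc.1,
                     if 0 < pvCnt p then max acc.2 (pvCnt p) else acc.2)) _ ?hcong]
  case hcong =>
    intro acc p _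
    have hn : ((p.2.filter (fun ce => !ce.1)).map (fun _ => (1 : Int))).sum = pvCnt p := by
      rw [PySem.List.sum_map_const_int, pvCnt, mul_one]
    simp only [hn]
    by_cases h : 0 < pvCnt p <;> simp [h]
  rw [PySem.List.foldl_prod_mk (f := fun l p => if 0 < pvCnt p then l ++ [(p.1, pvCnt p)] else l)
      (g := fun m p => if 0 < pvCnt p then max m (pvCnt p) else m), Prod.mk.injEq]
  constructor
  · rw [PySem.List.foldl_append_ite (fun p => 0 < pvCnt p) (fun p => (p.1, pvCnt p))]
    simp [pvNb]
  · rw [PySem.List.foldl_ite_eq_foldl_filter (fun p => 0 < pvCnt p) (fun m p => max m (pvCnt p))]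
    rfl

lemma pvMax_nonneg (e : List (String × List (Bool × Int))) : 0 ≤ pvMax e :=
  (PySem.List.le_foldl_max_int _ pvCnt 0).1

lemma pvNb_bounds (e : List (String × List (Bool × Int))) :
    ∀ q ∈ pvNb e, 0 < q.2 ∧ q.2 ≤ pvMax e := by
  intro q hq
  obtain ⟨p, hp, rfl⟩ := List.mem_map.mp hq
  have h1 := (List.mem_filter.mp hp).2
  refine ⟨by simpa using h1, ?_⟩
  exact (PySem.List.le_foldl_max_int _ pvCnt 0).2 p hp

-- the final indexing loop of A equals B's slice+map
lemma pvFinal (xs : List (String × Int)) (g : String × Int → String × List (Bool × Int))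
    (ns : Int) (hns : ns ≤ (xs.length : Int)) :
    (PySem.List.pyRange 0 ns).map (fun i => g (PySem.List.pyGetD xs i ("", 0)))
    = (PySem.List.slice xs none (some (max 0 ns))).map g := by
  by_cases h : 0 < ns
  · obtain ⟨t, rfl⟩ : ∃ t : Nat, ns = (t : Int) := ⟨ns.toNat, by omega⟩
    rw [PySem.List.pyRange_zero_natCast, List.map_map]
    rw [PySem.List.slice_to xs (by omega : (0:Int) ≤ max 0 (t : Int))]
    have : (max 0 (t : Int)).toNat = t := by omega
    rw [this]
    simp only [Function.comp_def]
    exact pvTake g ("", 0) xs t (by omega)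
  · have h1 : PySem.List.pyRange 0 ns = [] := by
      rw [PySem.List.pyRange]
      norm_num
      intro h2
      omega
    have h2 : max 0 ns = 0 := by omega
    rw [h1, h2, PySem.List.slice_to xs le_rfl]
    simp

lemma pvMain : ∀ (e : List (String × List (Bool × Int))) (wk : Option Int),
    (e.map Prod.fst).Nodup → sort_split_data e wk = sort_split_data_alt e wk := by
  intro e wk hpre
  unfold sort_split_data sort_split_data_alt
  simp only [pvBfold e]
  have hitems : (e.foldl (fun d p => p.2.foldl (fun d ce => if !ce.1 then d.modify p.1 0 (· + 1) else d) d) (PySem.Dict.empty : PySem.Dict String Int)).items = pvNb e := by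
    rw [pvItemsA e _ (fun p _ => by simp) hpre]
    rfl
  simp only [hitems]
  -- order: B's double loop is the bucket list
  have horder : (PySem.List.pyRange (pvMax e) 0 (-1)).foldl
      (fun acc c => (pvNb e).foldl (fun acc item => if item.2 == c then acc ++ [item] else acc) acc) []
      = pvBuckets (pvMax e).toNat (pvNb e) := by
    have hcast : ((pvMax e).toNat : Int) = pvMax e := by
      have := pvMax_nonneg e; omega
    rw [← hcast, pvRangeDesc]
    rw [PySem.List.foldl_congr_mem _ _ (fun acc c => acc ++ (pvNb e).filter (fun item => item.2 == c)) _
        (fun acc c _ => PySem.List.foldl_append_if_eq_filter _ _ _)]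
    rw [PySem.List.foldl_append_eq_flatMap]
    rfl
  simp only [horder]
  have hsorted : PySem.List.sorted (pvNb e) (fun values => values.2) true
      = pvBuckets (pvMax e).toNat (pvNb e) := by
    apply pvBucket
    intro q hq
    have := pvNb_bounds e q hq
    have hc : ((pvMax e).toNat : Int) = pvMax e := by have := pvMax_nonneg e; omega
    omega
  simp only [hsorted]
  have hlen : (pvBuckets (pvMax e).toNat (pvNb e)).length = (pvNb e).length := by
    rw [← hsorted, PySem.List.length_sorted]
  simp only [PySem.Dict.size, hitems, hlen]
  cases wk with
  | none =>
    rw [PySem.List.foldl_append_singleton_eq_map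
        (f := fun i => ((PySem.List.pyGetD (pvBuckets (pvMax e).toNat (pvNb e)) i ("", 0)).1,
          (PySem.Dict.mk e).getD (PySem.List.pyGetD (pvBuckets (pvMax e).toNat (pvNb e)) i ("", 0)).1 []))]
    rw [List.nil_append]
    exact pvFinal _ (fun item => (item.1, (PySem.Dict.mk e).getD item.1 [])) _ (by rw [hlen])
  | some k =>
    rw [PySem.List.foldl_append_singleton_eq_map
        (f := fun i => ((PySem.List.pyGetD (pvBuckets (pvMax e).toNat (pvNb e)) i ("", 0)).1,
          (PySem.Dict.mk e).getD (PySem.List.pyGetD (pvBuckets (pvMax e).toNat (pvNb e)) i ("", 0)).1 []))]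
    rw [List.nil_append]
    exact pvFinal _ (fun item => (item.1, (PySem.Dict.mk e).getD item.1 [])) _ (by rw [hlen]; exact min_le_right _ _)

-- ===== VERDICT (by name: the statement is the Claim_ definition above) =====
theorem sort_split_data_spec : Claim_equal_sort_split_data := by
  intro errors_by_sample worst_k_samples _ hpre
  unfold Spec_sort_split_data
  exact pvMain errors_by_sample worst_k_samples hpre
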